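-- pv_equiv track=rewrite | github.com/awd1779/pi0 | src/cgvd/grounded_sam3_segmenter.py | _match_label_to_concept
-- ===== SOURCE A (Python) =====
-- from typing import Dict, List, Optional, Tuple
--
-- def _match_label_to_concept(label: str, concept_list: List[str]) -> Optional[str]:
--     """Match a GDINO label to the best matching concept."""
--     label_lower = label.lower().strip()
--
--     # Exact match
--     for c in concept_list:
--         if label_lower == c.lower():
--             return c
--
--     # Substring match (label in concept or concept in label)
--     for c in concept_list:
--         if label_lower in c.lower() or c.lower() in label_lower:
--             return c
--
--     # Word overlap (at least one shared word)
--     label_words = set(label_lower.split())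
--     best, best_overlap = None, 0
--     for c in concept_list:
--         overlap = len(label_words & set(c.lower().split()))
--         if overlap > best_overlap:
--             best_overlap = overlap
--             best = c
--
--     return best if best_overlap > 0 else None
-- ===== SOURCE B (Python) =====
-- def _match_label_to_concept(label, concept_list):
--     """Match a GDINO label to the best matching concept (single pass)."""
--     label_lower = label.lower().strip()
--     label_words = set(label_lower.split())
--     best, best_key = None, (0, 0)
--     for c in concept_list:
--         cl = c.lower()
--         if label_lower == cl:
--             key = (3, 0)
--         elif label_lower in cl or cl in label_lower:
--             key = (2, 0)
--         else:
--             overlap = len(label_words & set(cl.split()))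
--             key = (1, overlap) if overlap > 0 else (0, 0)
--         if best_key < key:
--             best, best_key = c, key
--     return best
-- ===== Notes on version B (the rewrite author's own statement) =====
-- stated objective: simpler
-- what changed: Replaces A's three separate passes (exact, substring, word-overlap argmax) by one loop keeping the best concept under a lexicographic (tier, overlap) key with strict-greater updates so the earliest concept wins ties.
import Mathlib
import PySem

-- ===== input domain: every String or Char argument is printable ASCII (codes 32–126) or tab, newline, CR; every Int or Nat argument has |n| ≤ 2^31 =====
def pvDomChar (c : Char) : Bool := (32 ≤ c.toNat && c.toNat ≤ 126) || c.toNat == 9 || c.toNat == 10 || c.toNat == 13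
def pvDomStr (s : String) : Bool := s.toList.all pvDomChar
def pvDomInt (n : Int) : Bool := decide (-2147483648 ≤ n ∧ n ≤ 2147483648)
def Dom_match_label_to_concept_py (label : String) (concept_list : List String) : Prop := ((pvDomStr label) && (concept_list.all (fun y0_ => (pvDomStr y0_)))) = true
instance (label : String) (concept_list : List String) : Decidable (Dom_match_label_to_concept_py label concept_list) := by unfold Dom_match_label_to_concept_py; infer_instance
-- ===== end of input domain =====

-- B replaces A's three separate passes by one loop keeping the best concept under a
-- lexicographic (tier, overlap) key with strict-greater updates; same results, simpler shape.

-- ===== PORT A =====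
-- literal transliteration of A: three passes (exact, substring, best word overlap)
def match_label_to_concept_py (label : String) (concept_list : List String) : Option String :=
  let ll := PySem.Str.strip (PySem.Str.lower label)
  match concept_list.find? (fun c => ll == PySem.Str.lower c) with
  | some c => some c
  | none =>
    match concept_list.find? (fun c =>
        PySem.Str.isIn ll (PySem.Str.lower c) || PySem.Str.isIn (PySem.Str.lower c) ll) with
    | some c => some c
    | none =>
      let lw := PySem.Set.ofList (PySem.Str.split₀ ll)
      let r := concept_list.foldl (fun (st : Option String × Nat) c =>
          let ov := (PySem.Set.inter lw (PySem.Set.ofList (PySem.Str.split₀ (PySem.Str.lower c)))).length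
          if st.2 < ov then (some c, ov) else st)
        (none, 0)
      if 0 < r.2 then r.1 else none

-- ===== PORT B =====
-- key of a concept: (tier, overlap); tuple comparison in Source B is lexicographic (pvLtK)
def pvKey (ll : String) (lw : PySem.Set String) (c : String) : Nat × Nat :=
  let cl := PySem.Str.lower c
  if ll == cl then (3, 0)
  else if PySem.Str.isIn ll cl || PySem.Str.isIn cl ll then (2, 0)
  else
    let ov := (PySem.Set.inter lw (PySem.Set.ofList (PySem.Str.split₀ cl))).length
    if 0 < ov then (1, ov) else (0, 0)

def pvLtK (a b : Nat × Nat) : Bool := a.1 < b.1 || (a.1 == b.1 && a.2 < b.2)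

-- literal transliteration of Source B: one fold maintaining (best, best_key)
def match_label_to_concept_py_alt (label : String) (concept_list : List String) : Option String :=
  let ll := PySem.Str.strip (PySem.Str.lower label)
  let lw := PySem.Set.ofList (PySem.Str.split₀ ll)
  (concept_list.foldl (fun (st : Option String × (Nat × Nat)) c =>
      let k := pvKey ll lw c
      if pvLtK st.2 k then (some c, k) else st)
    (none, (0, 0))).1

-- ===== PRECONDITION & SPEC =====
def Spec_match_label_to_concept_py (label : String) (concept_list : List String) (out : Option String) : Prop := out = match_label_to_concept_py_alt label concept_list
instance (label : String) (concept_list : List String) (out : Option String) : Decidable (Spec_match_label_to_concept_py label concept_list out) := by unfold Spec_match_label_to_concept_py; infer_instance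

-- ===== CLAIM (what is proved, stated in full; the proofs are below) =====
def Claim_equal_match_label_to_concept_py : Prop := ∀ (label : String) (concept_list : List String), Dom_match_label_to_concept_py label concept_list → Spec_match_label_to_concept_py label concept_list (match_label_to_concept_py label concept_list)

-- ===== LEMMAS AND PROOFS =====

-- B's fold step, abstracted over the key function
def pvStepB (key : String → Nat × Nat) (st : Option String × (Nat × Nat)) (c : String) :
    Option String × (Nat × Nat) :=
  if pvLtK st.2 (key c) then (some c, key c) else st

-- once the state's key dominates all remaining keys, the fold is stalled
theorem pvFoldB_stall (key : String → Nat × Nat) (l : List String) (b : Option String)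
    (K : Nat × Nat) (h : ∀ d ∈ l, pvLtK K (key d) = false) :
    l.foldl (pvStepB key) (b, K) = (b, K) := by
  induction l with
  | nil => rfl
  | cons c t ih =>
    simp only [List.foldl_cons, pvStepB, h c (by simp)]
    exact ih (fun d hd => h d (by simp [hd]))

-- the state's key is the initial key or the key of some processed element
theorem pvFoldB_key_mem (key : String → Nat × Nat) (l : List String) :
    ∀ (b : Option String) (k : Nat × Nat),
      (l.foldl (pvStepB key) (b, k)).2 = k ∨ ∃ d ∈ l, (l.foldl (pvStepB key) (b, k)).2 = key d := by
  induction l with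
  | nil => intro b k; left; rfl
  | cons c t ih =>
    intro b k
    simp only [List.foldl_cons, pvStepB]
    by_cases h : pvLtK k (key c) = true
    · simp only [h, if_pos]
      rcases ih (some c) (key c) with h1 | ⟨d, hd, h2⟩
      · right; exact ⟨c, by simp, h1⟩
      · right; exact ⟨d, by simp [hd], h2⟩
    · rw [Bool.not_eq_true] at h
      simp only [h, Bool.false_eq_true, if_false]
      rcases ih b k with h1 | ⟨d, hd, h2⟩
      · left; exact h1
      · right; exact ⟨d, by simp [hd], h2⟩

-- first element whose key strictly beats everything before it, and is not beaten after: it wins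
theorem pvFoldB_first_max (key : String → Nat × Nat) (pre post : List String) (c : String)
    (hpre : ∀ d ∈ pre, pvLtK (key d) (key c) = true)
    (h0 : pvLtK (0, 0) (key c) = true)
    (hpost : ∀ d ∈ post, pvLtK (key c) (key d) = false) :
    (pre ++ c :: post).foldl (pvStepB key) (none, (0, 0)) = (some c, key c) := by
  rw [List.foldl_append]
  have hkey : ((pre.foldl (pvStepB key) (none, (0,0))).2 = (0,0)) ∨
      ∃ d ∈ pre, (pre.foldl (pvStepB key) (none, (0,0))).2 = key d := pvFoldB_key_mem key pre none (0,0)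
  have hlt : pvLtK (pre.foldl (pvStepB key) (none, (0,0))).2 (key c) = true := by
    rcases hkey with h | ⟨d, hd, h⟩
    · rw [h]; exact h0
    · rw [h]; exact hpre d hd
  simp only [List.foldl_cons, pvStepB, hlt, if_pos]
  exact pvFoldB_stall key post (some c) (key c) hpost

-- A's overlap-fold step
def pvStepA (ovf : String → Nat) (st : Option String × Nat) (c : String) : Option String × Nat :=
  if st.2 < ovf c then (some c, ovf c) else st

theorem pvFoldA_mono (ovf : String → Nat) (l : List String) :
    ∀ (b : Option String) (o : Nat), o ≤ (l.foldl (pvStepA ovf) (b, o)).2 := by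
  induction l with
  | nil => intro b o; exact le_refl _
  | cons c t ih =>
    intro b o
    simp only [List.foldl_cons, pvStepA]
    by_cases h : o < ovf c
    · simp only [h, if_pos]; exact le_of_lt (lt_of_lt_of_le h (ih (some c) (ovf c)))
    · simp only [h]; simpa using ih b o

theorem pvFoldA_none (ovf : String → Nat) (l : List String) :
    ∀ (b : Option String) (o : Nat), (l.foldl (pvStepA ovf) (b, o)).2 = 0 → (l.foldl (pvStepA ovf) (b, o)).1 = b := by
  induction l with
  | nil => intro b o _; rfl
  | cons c t ih =>
    intro b o h
    simp only [List.foldl_cons, pvStepA] at h ⊢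
    by_cases hc : o < ovf c
    · exfalso
      simp only [hc, if_pos] at h
      have := pvFoldA_mono ovf t (some c) (ovf c)
      omega
    · simp only [hc] at h ⊢; exact ih b o h

-- in the no-exact, no-substring case B's fold simulates A's overlap fold
theorem pvFoldB_case3 (ll : String) (lw : PySem.Set String)
    (ovf : String → Nat)
    (hov : ovf = fun c => (PySem.Set.inter lw (PySem.Set.ofList (PySem.Str.split₀ (PySem.Str.lower c)))).length)
    (l : List String)
    (hl : ∀ c ∈ l, (ll == PySem.Str.lower c) = false ∧
        (PySem.Str.isIn ll (PySem.Str.lower c) || PySem.Str.isIn (PySem.Str.lower c) ll) = false) :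
    ∀ (b : Option String) (o : Nat),
      l.foldl (pvStepB (pvKey ll lw)) (b, ((if 0 < o then 1 else 0), o))
        = ((l.foldl (pvStepA ovf) (b, o)).1,
           ((if 0 < (l.foldl (pvStepA ovf) (b, o)).2 then 1 else 0), (l.foldl (pvStepA ovf) (b, o)).2)) := by
  induction l with
  | nil => intro b o; rfl
  | cons c t ih =>
    intro b o
    have hc := hl c (by simp)
    have hkey : pvKey ll lw c = ((if 0 < ovf c then 1 else 0), ovf c) := by
      simp only [pvKey, hc.1, hc.2, Bool.false_eq_true, if_false, hov]
      by_cases h : 0 < (PySem.Set.inter lw (PySem.Set.ofList (PySem.Str.split₀ (PySem.Str.lower c)))).length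
      · simp [h]
      · simp [h]; omega
    have hlt : pvLtK ((if 0 < o then 1 else 0), o) ((if 0 < ovf c then 1 else 0), ovf c)
        = decide (o < ovf c) := by
      simp only [pvLtK]
      by_cases h1 : 0 < o <;> by_cases h2 : 0 < ovf c <;> simp [h1, h2] <;> omega
    simp only [List.foldl_cons, pvStepB, pvStepA, hkey, hlt]
    by_cases h : o < ovf c
    · simp only [h, decide_true, if_pos]
      exact ih (fun d hd => hl d (by simp [hd])) (some c) (ovf c)
    · simp only [h, decide_false, Bool.false_eq_true, if_false]
      exact ih (fun d hd => hl d (by simp [hd])) b o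

-- keys have tier 3 iff exact, tier ≥ 2 iff exact or substring
theorem pvKey_exact (ll : String) (lw : PySem.Set String) (c : String)
    (h : (ll == PySem.Str.lower c) = true) : pvKey ll lw c = (3, 0) := by
  simp [pvKey, h]

theorem pvKey_sub (ll : String) (lw : PySem.Set String) (c : String)
    (h1 : (ll == PySem.Str.lower c) = false)
    (h2 : (PySem.Str.isIn ll (PySem.Str.lower c) || PySem.Str.isIn (PySem.Str.lower c) ll) = true) :
    pvKey ll lw c = (2, 0) := by
  simp only [pvKey, h1, h2, Bool.false_eq_true, if_false, if_true]

theorem pvKey_fst_le_one (ll : String) (lw : PySem.Set String) (c : String)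
    (h1 : (ll == PySem.Str.lower c) = false)
    (h2 : (PySem.Str.isIn ll (PySem.Str.lower c) || PySem.Str.isIn (PySem.Str.lower c) ll) = false) :
    (pvKey ll lw c).1 ≤ 1 := by
  simp only [pvKey, h1, h2, Bool.false_eq_true, if_false]
  split_ifs <;> simp

theorem pvKey_bound (ll : String) (lw : PySem.Set String) (c : String) :
    (pvKey ll lw c).1 ≤ 3 ∧ (2 ≤ (pvKey ll lw c).1 → (pvKey ll lw c).2 = 0) := by
  simp only [pvKey]; split_ifs <;> simp

theorem pvKey_fst_le_two (ll : String) (lw : PySem.Set String) (c : String)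
    (h1 : (ll == PySem.Str.lower c) = false) : (pvKey ll lw c).1 ≤ 2 := by
  simp only [pvKey, h1, Bool.false_eq_true, if_false]; split_ifs <;> simp

theorem match_label_to_concept_py_spec' (label : String) (concept_list : List String) :
    match_label_to_concept_py label concept_list = match_label_to_concept_py_alt label concept_list := by
  set ll := PySem.Str.strip (PySem.Str.lower label) with hll
  set lw := PySem.Set.ofList (PySem.Str.split₀ ll) with hlw
  have hA : match_label_to_concept_py label concept_list =
      (match concept_list.find? (fun c => ll == PySem.Str.lower c) with
       | some c => some c
       | none =>
         match concept_list.find? (fun c =>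
             PySem.Str.isIn ll (PySem.Str.lower c) || PySem.Str.isIn (PySem.Str.lower c) ll) with
         | some c => some c
         | none =>
           let r := concept_list.foldl (pvStepA (fun c =>
               (PySem.Set.inter lw (PySem.Set.ofList (PySem.Str.split₀ (PySem.Str.lower c)))).length))
             (none, 0)
           if 0 < r.2 then r.1 else none) := rfl
  have hB : match_label_to_concept_py_alt label concept_list =
      (concept_list.foldl (pvStepB (pvKey ll lw)) (none, (0, 0))).1 := rfl
  rw [hA, hB]
  cases hfind1 : concept_list.find? (fun c => ll == PySem.Str.lower c) with
  | some c =>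
    -- first exact match wins in B too
    rw [List.find?_eq_some_iff_append] at hfind1
    obtain ⟨hc, pre, post, hsplit, hpre⟩ := hfind1
    rw [hsplit, pvFoldB_first_max (pvKey ll lw) pre post c]
    · intro d hd
      have hd1 : (ll == PySem.Str.lower d) = false := by simpa using hpre d hd
      rw [pvKey_exact ll lw c hc]
      by_cases h2 : (PySem.Str.isIn ll (PySem.Str.lower d) || PySem.Str.isIn (PySem.Str.lower d) ll) = true
      · rw [pvKey_sub ll lw d hd1 h2]; decide
      · have := pvKey_fst_le_one ll lw d hd1 (by simpa using h2)
        simp only [pvLtK]; simp; omega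
    · rw [pvKey_exact ll lw c hc]; decide
    · intro d hd
      rw [pvKey_exact ll lw c hc]
      have hb := pvKey_bound ll lw d
      simp only [pvLtK]; simp
      omega
  | none =>
    have hnoex : ∀ d ∈ concept_list, (ll == PySem.Str.lower d) = false := by
      intro d hd; simpa using List.find?_eq_none.mp hfind1 d hd
    cases hfind2 : concept_list.find? (fun c =>
        PySem.Str.isIn ll (PySem.Str.lower c) || PySem.Str.isIn (PySem.Str.lower c) ll) with
    | some c =>
      rw [List.find?_eq_some_iff_append] at hfind2
      obtain ⟨hc, pre, post, hsplit, hpre⟩ := hfind2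
      have hc1 : (ll == PySem.Str.lower c) = false := hnoex c (by rw [hsplit]; simp)
      rw [hsplit, pvFoldB_first_max (pvKey ll lw) pre post c]
      · intro d hd
        have hd1 : (ll == PySem.Str.lower d) = false := hnoex d (by rw [hsplit]; simp [hd])
        have hd2 := pvKey_fst_le_one ll lw d hd1 (by simpa using hpre d hd)
        rw [pvKey_sub ll lw c hc1 hc]
        simp only [pvLtK]; simp; omega
      · rw [pvKey_sub ll lw c hc1 hc]; decide
      · intro d hd
        rw [pvKey_sub ll lw c hc1 hc]
        have hd1 : (ll == PySem.Str.lower d) = false := hnoex d (by rw [hsplit]; simp [hd])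
        have hb := pvKey_bound ll lw d
        have h2 := pvKey_fst_le_two ll lw d hd1
        simp only [pvLtK]; simp
        omega
    | none =>
      have hnosub : ∀ d ∈ concept_list,
          (PySem.Str.isIn ll (PySem.Str.lower d) || PySem.Str.isIn (PySem.Str.lower d) ll) = false := by
        intro d hd; simpa using List.find?_eq_none.mp hfind2 d hd
      have h3 := pvFoldB_case3 ll lw _ rfl concept_list
        (fun d hd => ⟨hnoex d hd, hnosub d hd⟩) none 0
      simp only [show ((if (0:Nat) < 0 then 1 else 0), (0:Nat)) = ((0:Nat),(0:Nat)) from rfl] at h3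
      rw [h3]
      by_cases hpos : 0 < (concept_list.foldl (pvStepA fun c => (PySem.Set.inter lw (PySem.Set.ofList (PySem.Str.split₀ (PySem.Str.lower c)))).length) (none, 0)).2
      · simp [hpos]
      · simp only [hpos, if_false]
        exact (pvFoldA_none _ concept_list none 0 (by omega)).symm

-- ===== VERDICT (by name: the statement is the Claim_ definition above) =====
theorem match_label_to_concept_py_spec : Claim_equal_match_label_to_concept_py := by
  intro label concept_list _
  exact match_label_to_concept_py_spec' label concept_list
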